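-- pv_equiv track=rewrite | github.com/zzeppozz/anaya | dammap/common/util.py | _format_filename
-- ===== SOURCE A (Python) =====
-- def _format_filename(basename):
--     name = ""
--     year = ""
--     mon = ""
--     day = ""
--     num = ""
--     datecount = 0
--     for ch in basename:
--         if datecount < 8:
--             if ch.isalpha():
--                 name += ch
--             elif ch.isdigit():
--                 # fill year, month, date in that order
--                 if len(year) < 4:
--                     year += ch
--                 elif len(mon) < 2:
--                     mon += ch
--                 elif len(day) < 2:
--                     day += ch
--                 datecount += 1
--         elif ch.isdigit():
--             num += ch
--     return "{}_{}-{}-{}_{}".format(name, year, mon, day, num)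
-- ===== SOURCE B (Python) =====
-- def _format_filename(basename):
--     name = []
--     digits = []
--     for ch in basename:
--         if ch.isdigit():
--             digits.append(ch)
--         elif ch.isalpha() and len(digits) < 8:
--             name.append(ch)
--     return "{}_{}-{}-{}_{}".format(
--         "".join(name), "".join(digits[:4]), "".join(digits[4:6]),
--         "".join(digits[6:8]), "".join(digits[8:]))
-- ===== Notes on version B (the rewrite author's own statement) =====
-- stated objective: simpler
-- what changed: B collects all digits in one list and the name (only while fewer than 8 digits have been seen) in a single pass, then slices the digit list into year/mon/day/num, replacing A's inline year/mon/day length-branch cascade and datecount bookkeeping.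
import Mathlib
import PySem

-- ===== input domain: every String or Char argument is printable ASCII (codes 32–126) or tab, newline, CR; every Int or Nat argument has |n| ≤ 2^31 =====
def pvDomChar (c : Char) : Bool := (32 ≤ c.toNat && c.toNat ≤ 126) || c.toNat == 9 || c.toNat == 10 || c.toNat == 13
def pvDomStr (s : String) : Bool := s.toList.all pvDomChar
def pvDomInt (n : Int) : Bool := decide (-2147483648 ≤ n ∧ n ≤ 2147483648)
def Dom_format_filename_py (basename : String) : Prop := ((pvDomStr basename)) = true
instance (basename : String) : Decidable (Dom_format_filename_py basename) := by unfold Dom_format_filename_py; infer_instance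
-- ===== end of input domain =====

-- B is simpler: one pass collecting digits (and name while fewer than 8 digits seen), then slices the digit list; same O(n) cost.

-- ===== PORT A =====
-- state: (name, year, mon, day, num, datecount); Python strings kept as List Char
def pvAStep (st : List Char × List Char × List Char × List Char × List Char × Int) (ch : Char) :
    List Char × List Char × List Char × List Char × List Char × Int :=
  let (name, year, mon, day, num, datecount) := st
  if datecount < 8 then
    if PySem.Chars.isalpha ch then (name ++ [ch], year, mon, day, num, datecount)
    else if PySem.Chars.isdigit ch then
      -- fill year, month, date in that order
      if year.length < 4 then (name, year ++ [ch], mon, day, num, datecount + 1)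
      else if mon.length < 2 then (name, year, mon ++ [ch], day, num, datecount + 1)
      else if day.length < 2 then (name, year, mon, day ++ [ch], num, datecount + 1)
      else (name, year, mon, day, num, datecount + 1)
    else st
  else if PySem.Chars.isdigit ch then (name, year, mon, day, num ++ [ch], datecount)
  else st

def format_filename_py (basename : String) : String :=
  let st := basename.toList.foldl pvAStep ([], [], [], [], [], 0)
  String.mk (st.1 ++ '_' :: st.2.1 ++ '-' :: st.2.2.1 ++ '-' :: st.2.2.2.1 ++ '_' :: st.2.2.2.2.1)

-- ===== PORT B =====
-- state: (name, digits)
def pvBStep (st : List Char × List Char) (ch : Char) : List Char × List Char :=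
  if PySem.Chars.isdigit ch then (st.1, st.2 ++ [ch])
  else if PySem.Chars.isalpha ch && decide (st.2.length < 8) then (st.1 ++ [ch], st.2)
  else st

def format_filename_py_alt (basename : String) : String :=
  let st := basename.toList.foldl pvBStep ([], [])
  let name := st.1
  let digits := st.2
  String.mk (name ++ '_' :: PySem.List.slice digits none (some 4)
    ++ '-' :: PySem.List.slice digits (some 4) (some 6)
    ++ '-' :: PySem.List.slice digits (some 6) (some 8)
    ++ '_' :: PySem.List.slice digits (some 8) none)

-- ===== PRECONDITION & SPEC =====
def Spec_format_filename_py (basename : String) (out : String) : Prop := out = format_filename_py_alt basename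
instance (basename : String) (out : String) : Decidable (Spec_format_filename_py basename out) := by unfold Spec_format_filename_py; infer_instance

-- ===== CLAIM (what is proved, stated in full; the proofs are below) =====
def Claim_equal_format_filename_py : Prop := ∀ (basename : String), Dom_format_filename_py basename → Spec_format_filename_py basename (format_filename_py basename)

-- ===== LEMMAS AND PROOFS =====

-- abstraction: B's state (name, digits) determines A's state
def pvAbs (s : List Char × List Char) :
    List Char × List Char × List Char × List Char × List Char × Int :=
  (s.1, s.2.take 4, (s.2.drop 4).take 2, (s.2.drop 6).take 2, s.2.drop 8,
    min (s.2.length : Int) 8)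

lemma pv_not_alpha_of_digit (c : Char) (h : PySem.Chars.isdigit c = true) :
    PySem.Chars.isalpha c = false := by
  simp [PySem.Chars.isdigit, Char.le_def, UInt32.le_iff_toNat_le] at h
  simp [PySem.Chars.isalpha, PySem.Chars.isupper, PySem.Chars.islower, Char.le_def,
    UInt32.le_iff_toNat_le]
  omega

lemma pv_take_app_lt (d : List Char) (c : Char) (k : Nat) (h : d.length < k) :
    (d ++ [c]).take k = d.take k ++ [c] := by
  rw [List.take_append]; congr 1; rw [List.take_of_length_le (by simp; omega)]

lemma pv_take_app_ge (d : List Char) (c : Char) (k : Nat) (h : k ≤ d.length) :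
    (d ++ [c]).take k = d.take k := by
  rw [List.take_append]; simp [Nat.sub_eq_zero_of_le h]

lemma pv_drop_app_lt (d : List Char) (c : Char) (k : Nat) (h : d.length < k) :
    (d ++ [c]).drop k = [] := by
  rw [List.drop_append]; simp; omega

lemma pv_drop_app_ge (d : List Char) (c : Char) (k : Nat) (h : k ≤ d.length) :
    (d ++ [c]).drop k = d.drop k ++ [c] := by
  rw [List.drop_append]; simp [Nat.sub_eq_zero_of_le h]

lemma pv_step (s : List Char × List Char) (c : Char) :
    pvAStep (pvAbs s) c = pvAbs (pvBStep s c) := by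
  obtain ⟨n, d⟩ := s
  by_cases hd : PySem.Chars.isdigit c
  · have ha := pv_not_alpha_of_digit c hd
    by_cases h8 : d.length < 8
    · have c8 : min (d.length : Int) 8 < 8 := by omega
      by_cases h4 : d.length < 4
      · have cy : (d.take 4).length < 4 := by simp [List.length_take]; omega
        simp [pvAStep, pvBStep, pvAbs, hd, ha, c8,
          pv_take_app_lt d c 4 h4,
          pv_drop_app_lt d c 4 h4, pv_drop_app_lt d c 6 (by omega), pv_drop_app_lt d c 8 (by omega),
          List.drop_eq_nil_of_le (show d.length ≤ 4 by omega),
          List.drop_eq_nil_of_le (show d.length ≤ 6 by omega),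
          List.drop_eq_nil_of_le (show d.length ≤ 8 by omega), List.length_take, List.length_append]
        simp [h4]
        omega
      · by_cases h6 : d.length < 6
        · have cy : ¬ (d.take 4).length < 4 := by simp [List.length_take]; omega
          have cm : ((d.drop 4).take 2).length < 2 := by simp [List.length_take]; omega
          simp [pvAStep, pvBStep, pvAbs, hd, ha,
            pv_take_app_ge d c 4 (by omega),
            pv_drop_app_ge d c 4 (by omega),
            pv_take_app_lt (d.drop 4) c 2 (by simp; omega),
            pv_drop_app_lt d c 6 h6, pv_drop_app_lt d c 8 (by omega),
            List.drop_eq_nil_of_le (show d.length ≤ 6 by omega),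
            List.drop_eq_nil_of_le (show d.length ≤ 8 by omega), List.length_take, List.length_append]
          split_ifs <;> first | (exfalso; omega) | (simp; omega)
        · have cy : ¬ (d.take 4).length < 4 := by simp [List.length_take]; omega
          have cm : ¬ ((d.drop 4).take 2).length < 2 := by simp [List.length_take]; omega
          have cdy : ((d.drop 6).take 2).length < 2 := by simp [List.length_take]; omega
          simp [pvAStep, pvBStep, pvAbs, hd, ha,
            pv_take_app_ge d c 4 (by omega),
            pv_drop_app_ge d c 4 (by omega),
            pv_take_app_ge (d.drop 4) c 2 (by simp; omega),
            pv_drop_app_ge d c 6 (by omega),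
            pv_take_app_lt (d.drop 6) c 2 (by simp; omega),
            pv_drop_app_lt d c 8 h8,
            List.drop_eq_nil_of_le (show d.length ≤ 8 by omega), List.length_take, List.length_append]
          split_ifs <;> first | (exfalso; omega) | (simp; omega)
    · have c8 : ¬ min (d.length : Int) 8 < 8 := by omega
      simp [pvAStep, pvBStep, pvAbs, hd, ha, c8,
        pv_take_app_ge d c 4 (by omega),
        pv_drop_app_ge d c 4 (by omega),
        pv_take_app_ge (d.drop 4) c 2 (by simp; omega),
        pv_drop_app_ge d c 6 (by omega),
        pv_take_app_ge (d.drop 6) c 2 (by simp; omega),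
        pv_drop_app_ge d c 8 (by omega), List.length_take, List.length_append]
      omega
  · by_cases ha : PySem.Chars.isalpha c
    · by_cases h8 : d.length < 8
      · have c8 : min (d.length : Int) 8 < 8 := by omega
        simp [pvAStep, pvBStep, pvAbs, hd, ha, c8, h8]
      · have c8 : ¬ min (d.length : Int) 8 < 8 := by omega
        simp [pvAStep, pvBStep, pvAbs, hd, ha, c8, h8]
    · have hb : pvBStep (n, d) c = (n, d) := by simp [pvBStep, hd, ha]
      rw [hb]
      simp [pvAStep, pvAbs, hd, ha]

lemma pv_fold (l : List Char) (s : List Char × List Char) :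
    l.foldl pvAStep (pvAbs s) = pvAbs (l.foldl pvBStep s) :=
  List.foldl_hom pvAbs pv_step

-- ===== VERDICT (by name: the statement is the Claim_ definition above) =====
theorem format_filename_py_spec : Claim_equal_format_filename_py := by
  intro basename _
  unfold Spec_format_filename_py format_filename_py format_filename_py_alt
  have h0 : pvAbs (([], []) : List Char × List Char) = ([], [], [], [], [], 0) := rfl
  rw [← h0, pv_fold basename.toList ([], [])]
  simp [pvAbs, PySem.List.slice_to, PySem.List.slice_toNat, PySem.List.slice_from]
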